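-- pv_equiv track=rewrite | github.com/career-prep/ucp-namer-latam-2026 | homework3/jesus_romero/q5_FirstKBinaryNumbers.py | firstKBinaryNumbers
-- ===== SOURCE A (Python) =====
-- from collections import deque
--
-- def firstKBinaryNumbers(k): # Time Complexity: O(k), Space Complexity: O(k)
--     # 1. Handle edge case for k=0
--     if k <= 0:
--         return []
--
--     # 2. Use a queue to generate binary numbers in order
--     # Start with "0" if k >= 1 (per example, 0 is the first number)
--     result = []
--     queue = deque(["1"])
--
--     # Per example, the first number is "0"
--     result.append("0")
--     if k == 1:
--         return result
--
--     # 3. BFS-like generation: append '0' then '1' to current string to get next level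
--     while len(result) < k:
--         curr = queue.popleft()
--         result.append(curr)
--
--         # Check if we still need more numbers before adding to queue
--         if len(result) + len(queue) < k * 2: # Optimization to stop early
--             queue.append(curr + "0")
--             queue.append(curr + "1")
--
--     return result[:k]
-- ===== SOURCE B (Python) =====
-- def firstKBinaryNumbers(k):
--     # Direct per-index formatting: the i-th binary number is bin(i) without the '0b' prefix.
--     return [bin(i)[2:] for i in range(k)]
-- ===== Notes on version B (the rewrite author's own statement) =====
-- stated objective: simpler
-- what changed: Replaced the deque/BFS level-by-level generation (queue of strings, pop/append with an early-stop length check) by direct per-index integer formatting: the i-th output is bin(i)[2:] over range(k).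
import Mathlib
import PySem

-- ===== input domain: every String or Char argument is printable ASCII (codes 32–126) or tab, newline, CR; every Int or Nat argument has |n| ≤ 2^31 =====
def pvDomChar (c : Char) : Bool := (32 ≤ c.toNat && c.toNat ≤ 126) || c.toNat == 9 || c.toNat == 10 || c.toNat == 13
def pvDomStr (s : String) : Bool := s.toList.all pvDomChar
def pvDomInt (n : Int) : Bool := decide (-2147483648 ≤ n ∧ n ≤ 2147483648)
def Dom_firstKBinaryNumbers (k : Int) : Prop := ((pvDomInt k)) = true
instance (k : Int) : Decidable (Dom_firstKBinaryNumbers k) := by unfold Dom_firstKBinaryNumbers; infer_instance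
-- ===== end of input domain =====

-- B replaces A's deque/BFS generation by direct per-index binary formatting (objective: simpler).


-- ===== PORT A =====
-- A's BFS loop: while len(result) < k: pop, append, conditionally push curr+"0", curr+"1".
-- The [] branch of the match is Python's IndexError on an empty deque; it is unreachable
-- here (the queue provably never empties while len(result) < k, see the invariant lemma below).
def pvLoopA (k : Int) (result queue : List String) : List String :=
  if _h : (result.length : Int) < k then
    match queue with
    | [] => result
    | curr :: rest =>
      let result' := result ++ [curr]
      let queue' := if ((result'.length : Int) + (rest.length : Int) < k * 2)
                    then rest ++ [curr ++ "0", curr ++ "1"] else rest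
      pvLoopA k result' queue'
  else result
termination_by (k - result.length).toNat
decreasing_by simp only [List.length_append, List.length_cons, List.length_nil]; omega

def firstKBinaryNumbers (k : Int) : List String :=
  if k ≤ 0 then []
  else
    let result : List String := ["0"]
    if k = 1 then result
    else PySem.List.slice (pvLoopA k result ["1"]) none (some k)

-- ===== PORT B =====
-- port of Python's bin(n)[2:] for n ≥ 0: binary digits, most significant first, "0" for 0
def pvBinDigits (n : Nat) : String :=
  if _h : n = 0 then ""
  else pvBinDigits (n / 2) ++ (if n % 2 = 1 then "1" else "0")
termination_by n
decreasing_by exact Nat.div_lt_self (Nat.pos_of_ne_zero _h) (by omega)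

def pvBin (n : Nat) : String := if n = 0 then "0" else pvBinDigits n

def firstKBinaryNumbers_alt (k : Int) : List String :=
  (PySem.List.pyRange 0 k 1).map (fun i => pvBin i.toNat)

-- ===== PRECONDITION & SPEC =====
def Spec_firstKBinaryNumbers (k : Int) (out : List String) : Prop := out = firstKBinaryNumbers_alt k
instance (k : Int) (out : List String) : Decidable (Spec_firstKBinaryNumbers k out) := by unfold Spec_firstKBinaryNumbers; infer_instance

-- ===== CLAIM (what is proved, stated in full; the proofs are below) =====
def Claim_equal_firstKBinaryNumbers : Prop := ∀ (k : Int), Dom_firstKBinaryNumbers k → Spec_firstKBinaryNumbers k (firstKBinaryNumbers k)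

-- ===== LEMMAS AND PROOFS =====

lemma pvBinDigits_pos (m : Nat) (hm : 1 ≤ m) : pvBinDigits m = pvBin m := by
  unfold pvBin
  rw [if_neg (by omega)]

lemma pvBin_two_mul (m : Nat) (hm : 1 ≤ m) : pvBin (2 * m) = pvBin m ++ "0" := by
  rw [← pvBinDigits_pos (2 * m) (by omega), pvBinDigits, dif_neg (by omega : ¬ 2 * m = 0)]
  rw [Nat.mul_div_cancel_left m (by norm_num : 0 < 2), Nat.mul_mod_right,
      pvBinDigits_pos m hm]
  norm_num

lemma pvBin_two_mul_add_one (m : Nat) (hm : 1 ≤ m) : pvBin (2 * m + 1) = pvBin m ++ "1" := by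
  rw [← pvBinDigits_pos (2 * m + 1) (by omega), pvBinDigits,
      dif_neg (by omega : ¬ 2 * m + 1 = 0)]
  rw [(by omega : (2 * m + 1) / 2 = m), (by omega : (2 * m + 1) % 2 = 1),
      pvBinDigits_pos m hm]
  norm_num

lemma pvLoopA_stop (k : Int) (result queue : List String)
    (hge : ¬ ((result.length : Int) < k)) : pvLoopA k result queue = result := by
  rw [pvLoopA.eq_def, dif_neg hge]

lemma pvLoopA_cons (k : Int) (result : List String) (curr : String) (rest : List String)
    (hlt : (result.length : Int) < k) :
    pvLoopA k result (curr :: rest) =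
      pvLoopA k (result ++ [curr])
        (if ((((result ++ [curr]).length : Int)) + ((rest.length : Int)) < k * 2)
         then rest ++ [curr ++ "0", curr ++ "1"] else rest) := by
  rw [pvLoopA.eq_def, dif_pos hlt]

-- Loop invariant: after emitting binaries of 0..i, the queue holds binaries of i+1..2i+1,
-- and the loop finishes producing binaries of 0..k-1.
lemma pvLoopA_inv (k : Int) : ∀ n i : Nat, ((i : Int) + 1) + n = k →
    pvLoopA k ((List.range (i + 1)).map pvBin) ((List.range' (i + 1) (i + 1)).map pvBin)
      = (List.range k.toNat).map pvBin := by
  intro n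
  induction n with
  | zero =>
    intro i h
    rw [pvLoopA_stop _ _ _ (by simp; omega)]
    have hk : k.toNat = i + 1 := by omega
    rw [hk]
  | succ n ih =>
    intro i h
    have hlt : (((List.range (i + 1)).map pvBin).length : Int) < k := by simp; omega
    have hq : List.range' (i + 1) (i + 1) = (i + 1) :: List.range' (i + 2) i := by
      rw [List.range'_succ]
    rw [hq, List.map_cons, pvLoopA_cons _ _ _ _ hlt]
    have hres : ((List.range (i + 1)).map pvBin) ++ [pvBin (i + 1)]
        = (List.range (i + 2)).map pvBin := by
      simp [List.range_succ]
    have hcond : (((((List.range (i + 1)).map pvBin) ++ [pvBin (i + 1)]).length : Int)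
        + (((List.range' (i + 2) i).map pvBin).length : Int) < k * 2) := by
      simp; omega
    rw [if_pos hcond, hres]
    have hq' : ((List.range' (i + 2) i).map pvBin) ++ [pvBin (i + 1) ++ "0", pvBin (i + 1) ++ "1"]
        = (List.range' (i + 2) (i + 2)).map pvBin := by
      have e1 : List.range' (i + 2) (i + 2) = List.range' (i + 2) i ++ [2 * (i + 1), 2 * (i + 1) + 1] := by
        have a1 : List.range' (i + 2) (i + 2) = List.range' (i + 2) (i + 1) ++ [i + 2 + 1 * (i + 1)] :=
          List.range'_concat
        have a2 : List.range' (i + 2) (i + 1) = List.range' (i + 2) i ++ [i + 2 + 1 * i] :=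
          List.range'_concat
        rw [a1, a2]
        simp [List.append_assoc]
        omega
      rw [e1, ← pvBin_two_mul (i + 1) (by omega), ← pvBin_two_mul_add_one (i + 1) (by omega)]
      simp
    rw [hq']
    exact ih (i + 1) (by push_cast; omega)

lemma pvBin_zero : pvBin 0 = "0" := rfl

lemma pvBin_one : pvBin 1 = "1" := by
  rw [pvBin, if_neg one_ne_zero, pvBinDigits, dif_neg one_ne_zero, pvBinDigits, dif_pos rfl]
  norm_num

-- ===== VERDICT (by name: the statement is the Claim_ definition above) =====
theorem firstKBinaryNumbers_spec : Claim_equal_firstKBinaryNumbers := by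
  intro k _
  unfold Spec_firstKBinaryNumbers firstKBinaryNumbers firstKBinaryNumbers_alt
  by_cases h0 : k ≤ 0
  · rw [if_pos h0, PySem.List.pyRange_one_eq_nil (by omega)]; rfl
  · rw [if_neg h0]
    by_cases h1 : k = 1
    · subst h1
      rw [if_pos rfl, PySem.List.pyRange_one_cons (by norm_num),
          PySem.List.pyRange_one_eq_nil (by norm_num)]
      simp [pvBin_zero]
    · rw [if_neg h1]
      have hstart : pvLoopA k ["0"] ["1"] = (List.range k.toNat).map pvBin := by
        have := pvLoopA_inv k (k - 1).toNat 0 (by omega)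
        simpa [pvBin_zero, pvBin_one, List.range', List.range_succ] using this
      rw [hstart]
      rw [PySem.List.slice_to _ (by omega : (0 : Int) ≤ k)]
      rw [List.take_of_length_le (by simp)]
      rw [PySem.List.pyRange_one]
      simp
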